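-- pv_equiv track=rewrite | github.com/VINAYKUMAR-69/cryptography-and-network-security-for-edge-computing-CSA5109 | exp37/Frequency Attack on Monoalphabetic Cipher.py | letter_frequency_attack
-- ===== SOURCE A (Python) =====
-- from collections import Counter
--
-- english_freq_order = 'ETAOINSHRDLCUMWFGYPBVKJXQZ'
--
-- def letter_frequency_attack(ciphertext, top_n=5):
--     ciphertext = ''.join(filter(str.isalpha, ciphertext.upper()))
--     freq = Counter(ciphertext)
--     sorted_cipher_letters = [item[0] for item in freq.most_common()]
--
--     # Generate possible mappings using frequency rankings
--     guesses = []
--     for i in range(top_n):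
--         mapping = {}
--         for j, c in enumerate(sorted_cipher_letters):
--             if j < len(english_freq_order):
--                 mapping[c] = english_freq_order[(j + i) % len(english_freq_order)]
--
--         # Substitute based on the mapping
--         decrypted = ''.join(mapping.get(ch, ch) for ch in ciphertext)
--         guesses.append(decrypted)
--
--     return guesses
-- ===== SOURCE B (Python) =====
-- from collections import Counter
--
-- english_freq_order = 'ETAOINSHRDLCUMWFGYPBVKJXQZ'
--
-- def letter_frequency_attack(ciphertext, top_n=5):
--     text = ''.join(filter(str.isalpha, ciphertext.upper()))
--     order = [c for c, _ in Counter(text).most_common()]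
--     # guess 0: one translate of the ciphertext by frequency rank
--     base = text.translate(str.maketrans(''.join(order), english_freq_order[:len(order)]))
--     # every further guess is the PREVIOUS guess rotated one step along the
--     # English frequency string by a fixed successor permutation
--     succ = {english_freq_order[j]: english_freq_order[(j + 1) % 26] for j in range(26)}
--     guesses = []
--     g = base
--     for _ in range(top_n):
--         guesses.append(g)
--         g = ''.join(succ[ch] for ch in g)
--     return guesses
-- ===== Notes on version B (the rewrite author's own statement) =====
-- stated objective: alternative
-- what changed: B computes only the first guess directly (one translate of the ciphertext by frequency rank) and derives each subsequent guess from the PREVIOUS guess by applying a fixed 26-letter successor permutation of the English frequency string, instead of A's per-guess rebuild of a rank-to-letter substitution dict applied to the ciphertext.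
import Mathlib
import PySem

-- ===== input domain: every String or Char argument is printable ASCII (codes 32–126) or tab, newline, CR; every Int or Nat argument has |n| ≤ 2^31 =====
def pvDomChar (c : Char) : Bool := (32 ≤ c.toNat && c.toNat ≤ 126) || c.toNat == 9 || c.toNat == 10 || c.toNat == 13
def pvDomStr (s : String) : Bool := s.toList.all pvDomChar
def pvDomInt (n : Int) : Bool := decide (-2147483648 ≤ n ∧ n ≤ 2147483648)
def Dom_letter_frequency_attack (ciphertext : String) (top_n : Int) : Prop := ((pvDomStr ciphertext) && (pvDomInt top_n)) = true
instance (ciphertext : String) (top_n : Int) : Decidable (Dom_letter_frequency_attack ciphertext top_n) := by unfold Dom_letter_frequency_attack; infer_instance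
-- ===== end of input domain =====

-- B computes only guess 0 directly (one translate by frequency rank) and derives each further
-- guess from the previous one by a fixed successor permutation of the English frequency string,
-- instead of A's per-guess rebuild of a substitution dict (objective: alternative).

-- ===== PORT A =====
def pvFreqOrder : List Char := "ETAOINSHRDLCUMWFGYPBVKJXQZ".toList

def letter_frequency_attack (ciphertext : String) (top_n : Int) : List String :=
  -- ciphertext = ''.join(filter(str.isalpha, ciphertext.upper()))
  let text : List Char := (PySem.Chars.upper ciphertext.toList).filter PySem.Chars.isalpha
  -- freq = Counter(ciphertext)
  let freq := PySem.Dict.counter text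
  -- most_common() = sorted(items, key=itemgetter(1), reverse=True); sorted_cipher_letters = [item[0] ...]
  let sorted_cipher_letters := (PySem.List.sorted freq.items (fun item => item.2) true).map (fun item => item.1)
  (PySem.List.pyRange 0 top_n 1).foldl (fun guesses i =>
    let mapping := (PySem.List.enumerate sorted_cipher_letters 0).foldl (fun m jc =>
      if jc.1 < PySem.List.len pvFreqOrder then
        -- english_freq_order[(j+i) % 26]: the index is a mod-26 residue, always in range, so pyGetD is exact
        m.insert jc.2 (PySem.List.pyGetD pvFreqOrder (PySem.Int.mod (jc.1 + i) (PySem.List.len pvFreqOrder)) 'A')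
      else m) PySem.Dict.empty
    let decrypted := String.ofList (text.map (fun ch => mapping.getD ch ch))
    guesses ++ [decrypted]) []

-- ===== PORT B =====
def letter_frequency_attack_alt (ciphertext : String) (top_n : Int) : List String :=
  let text : List Char := (PySem.Chars.upper ciphertext.toList).filter PySem.Chars.isalpha
  let order := (PySem.List.sorted (PySem.Dict.counter text).items (fun item => item.2) true).map (fun item => item.1)
  -- str.maketrans(x, y) + translate, ported by hand (exact: per-char table, every char of text is a key)
  let table := (order.zip (pvFreqOrder.take order.length)).foldl
      (fun m p => m.insert p.1 p.2) (PySem.Dict.empty : PySem.Dict Char Char)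
  let base := text.map (fun ch => table.getD ch ch)
  -- succ = {E[j]: E[(j+1)%26] for j in range(26)}
  let succ := (PySem.List.pyRange 0 26 1).foldl
      (fun m j => m.insert (PySem.List.pyGetD pvFreqOrder j 'A')
        (PySem.List.pyGetD pvFreqOrder (PySem.Int.mod (j + 1) 26) 'A'))
      (PySem.Dict.empty : PySem.Dict Char Char)
  -- succ[ch]: every char of each guess is a letter of english_freq_order, so getD with a dummy default is exact
  let res := (PySem.List.pyRange 0 top_n 1).foldl
      (fun p _ => (p.1 ++ [String.ofList p.2], p.2.map (fun ch => succ.getD ch ch)))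
      (([] : List String), base)
  res.1

-- ===== PRECONDITION & SPEC =====
def Spec_letter_frequency_attack (ciphertext : String) (top_n : Int) (out : List String) : Prop := out = letter_frequency_attack_alt ciphertext top_n
instance (ciphertext : String) (top_n : Int) (out : List String) : Decidable (Spec_letter_frequency_attack ciphertext top_n out) := by unfold Spec_letter_frequency_attack; infer_instance

-- ===== CLAIM (what is proved, stated in full; the proofs are below) =====
def Claim_equal_letter_frequency_attack : Prop := ∀ (ciphertext : String) (top_n : Int), Dom_letter_frequency_attack ciphertext top_n → Spec_letter_frequency_attack ciphertext top_n (letter_frequency_attack ciphertext top_n)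

-- ===== LEMMAS AND PROOFS =====

-- B's successor dict, named for the proofs (definitionally the dict built inside the port).
def pvSuccD : PySem.Dict Char Char :=
  (PySem.List.pyRange 0 26 1).foldl
    (fun m j => m.insert (PySem.List.pyGetD pvFreqOrder j 'A')
      (PySem.List.pyGetD pvFreqOrder (PySem.Int.mod (j + 1) 26) 'A'))
    (PySem.Dict.empty : PySem.Dict Char Char)

-- the English frequency letter of rank j
def pvE (j : Nat) : Char := PySem.List.pyGetD pvFreqOrder (j : Int) 'A'

theorem pv_pvE_getElem (k : Nat) (hk : k < 26) : pvE k = pvFreqOrder[k] := by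
  unfold pvE
  rw [PySem.List.pyGetD_natCast, List.getD_eq_getElem _ _ (by simpa using hk)]

set_option maxRecDepth 8192 in
theorem pv_succ_fin : ∀ j : Fin 26,
    pvSuccD.getD (pvE j.val) (pvE j.val) = pvE ((j.val + 1) % 26) := by decide

theorem pv_iter_succ (i : Nat) : ∀ (j : Nat), j < 26 →
    (fun ch => pvSuccD.getD ch ch)^[i] (pvE j) = pvE ((j + i) % 26) := by
  induction i with
  | zero => intro j hj; simp [Nat.mod_eq_of_lt hj]
  | succ i ih =>
    intro j hj
    rw [Function.iterate_succ_apply]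
    rw [show pvSuccD.getD (pvE j) (pvE j) = pvE ((j + 1) % 26) from pv_succ_fin ⟨j, hj⟩,
      ih ((j + 1) % 26) (Nat.mod_lt _ (by omega))]
    congr 1
    omega

-- Every ASCII uppercase letter is a member of the 26-letter alphabet list.
theorem pv_mem_az (c : Char) (h : PySem.Chars.isupper c = true) :
    c ∈ ("ABCDEFGHIJKLMNOPQRSTUVWXYZ".toList) := by
  simp only [PySem.Chars.isupper, Bool.and_eq_true, decide_eq_true_eq, Char.le_def,
    UInt32.le_iff_toNat_le] at h
  have hn : 65 ≤ c.toNat ∧ c.toNat ≤ 90 := by unfold Char.toNat; exact h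
  have heq : ("ABCDEFGHIJKLMNOPQRSTUVWXYZ".toList)
      = (List.range 26).map (fun k => Char.ofNat (65 + k)) := by decide
  rw [heq]
  refine List.mem_map.mpr ⟨c.toNat - 65, List.mem_range.mpr (by omega), ?_⟩
  have h2 : 65 + (c.toNat - 65) = c.toNat := by omega
  rw [h2, Char.ofNat_toNat]

-- upperChar never yields a lowercase character.
theorem pv_not_islower_upperChar (c : Char) :
    PySem.Chars.islower (PySem.Chars.upperChar c) = false := by
  unfold PySem.Chars.upperChar
  by_cases h : PySem.Chars.islower c = true
  · simp only [h, if_true]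
    have hn : 97 ≤ c.toNat ∧ c.toNat ≤ 122 := by
      simp only [PySem.Chars.islower, Bool.and_eq_true, decide_eq_true_eq, Char.le_def,
        UInt32.le_iff_toNat_le] at h
      unfold Char.toNat; exact h
    have hval : (c.toNat - 32).isValidChar := by unfold Nat.isValidChar; omega
    have hv : (Char.ofNat (c.toNat - 32)).toNat = c.toNat - 32 := by
      rw [Char.toNat_ofNat, if_pos hval]
    have hlt : ¬ ('a' ≤ Char.ofNat (c.toNat - 32)) := by
      rw [Char.le_def, UInt32.le_iff_toNat_le]
      have h97 : 'a'.val.toNat = 97 := rfl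
      have hv' : (Char.ofNat (c.toNat - 32)).val.toNat = c.toNat - 32 := hv
      rw [h97, hv']
      omega
    simp [PySem.Chars.islower, hlt]
  · simp only [Bool.not_eq_true] at h
    simp [h]

-- A character surviving the isalpha filter after upper() is an uppercase ASCII letter.
theorem pv_text_upper (s : List Char) (c : Char)
    (hc : c ∈ (PySem.Chars.upper s).filter PySem.Chars.isalpha) :
    PySem.Chars.isupper c = true := by
  rw [List.mem_filter] at hc
  obtain ⟨hmem, halpha⟩ := hc
  unfold PySem.Chars.upper at hmem
  obtain ⟨c0, _, rfl⟩ := List.mem_map.mp hmem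
  unfold PySem.Chars.isalpha at halpha
  rw [pv_not_islower_upperChar c0] at halpha
  simpa using halpha

-- Lookup in a dict built by inserting f(j) at each letter of a Nodup list, enumerated from 0.
theorem pv_getD_fold_insert {ν : Type} (letters : List Char) (hnd : letters.Nodup)
    (f : Int → ν) (ch : Char) (k : Nat) (hk : k < letters.length) (hco : letters[k] = ch)
    (d0 : ν) :
    ((PySem.List.enumerate letters 0).foldl
        (fun m jc => m.insert jc.2 (f jc.1)) PySem.Dict.empty).getD ch d0 = f k := by
  have hfresh : ∀ a ∈ PySem.List.enumerate letters 0,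
      (PySem.Dict.empty : PySem.Dict Char ν).contains a.2 = false := by
    intro a _; simp [pysem]
  have hnd2 : ((PySem.List.enumerate letters 0).map (fun jc => jc.2)).Nodup := by
    rw [PySem.List.map_snd_enumerate]; exact hnd
  have hitems := PySem.Dict.items_foldl_insert_fresh (PySem.List.enumerate letters 0)
    (fun jc => jc.2) (fun jc => f jc.1) PySem.Dict.empty hfresh hnd2
  have hmem : ((0 : Int) + (k : Int), ch) ∈ PySem.List.enumerate letters 0 := by
    rw [PySem.List.mem_enumerate_iff]
    exact ⟨k, hk, by rw [hco]⟩
  have hpair : (ch, f ((0 : Int) + (k : Int))) ∈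
      ((PySem.List.enumerate letters 0).foldl
        (fun m jc => m.insert jc.2 (f jc.1)) PySem.Dict.empty).items := by
    rw [hitems]
    simp only [List.mem_append, List.mem_map]
    right
    exact ⟨((0 : Int) + (k : Int), ch), hmem, rfl⟩
  have hkeys : ((PySem.List.enumerate letters 0).foldl
      (fun m jc => m.insert jc.2 (f jc.1)) PySem.Dict.empty).keys.Nodup := by
    exact PySem.Dict.nodup_keys_foldl_insert_key (PySem.List.enumerate letters)
      (fun jc => jc.2) (fun m jc => f jc.1) PySem.Dict.empty (by simp [pysem])
  have := PySem.Dict.getD_of_mem_items _ hpair hkeys d0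
  rw [this]
  norm_num

-- Lookup in the translate table built from zipping the keys with the values.
theorem pv_getD_zip (letters vals : List Char) (hnd : letters.Nodup)
    (hlen : letters.length ≤ vals.length) (k : Nat) (hk : k < letters.length) (d0 : Char) :
    ((letters.zip vals).foldl (fun m p => m.insert p.1 p.2)
        (PySem.Dict.empty : PySem.Dict Char Char)).getD letters[k] d0 = vals[k] := by
  have hfresh : ∀ a ∈ letters.zip vals,
      (PySem.Dict.empty : PySem.Dict Char Char).contains a.1 = false := by
    intro a _; simp [pysem]
  have hmapfst : (letters.zip vals).map (fun p => p.1) = letters := by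
    simpa using List.map_fst_zip hlen
  have hnd2 : ((letters.zip vals).map (fun p => p.1)).Nodup := by rw [hmapfst]; exact hnd
  have hitems := PySem.Dict.items_foldl_insert_fresh (letters.zip vals)
    (fun p => p.1) (fun p => p.2) PySem.Dict.empty hfresh hnd2
  have hkv : k < vals.length := lt_of_lt_of_le hk hlen
  have hmem : (letters[k], vals[k]) ∈ letters.zip vals := by
    have hgz : (letters.zip vals)[k]'(by simp [List.length_zip]; omega) = (letters[k], vals[k]) :=
      List.getElem_zip ..
    rw [← hgz]; exact List.getElem_mem _
  have hpair : (letters[k], vals[k]) ∈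
      ((letters.zip vals).foldl (fun m p => m.insert p.1 p.2)
        (PySem.Dict.empty : PySem.Dict Char Char)).items := by
    rw [hitems]
    refine List.mem_append.mpr (Or.inr ?_)
    exact List.mem_map.mpr ⟨(letters[k], vals[k]), hmem, rfl⟩
  have hkeys : ((letters.zip vals).foldl (fun m p => m.insert p.1 p.2)
      (PySem.Dict.empty : PySem.Dict Char Char)).keys.Nodup :=
    PySem.Dict.nodup_keys_foldl_insert_key (letters.zip vals)
      (fun p => p.1) (fun m p => p.2) PySem.Dict.empty (by simp [pysem])
  exact PySem.Dict.getD_of_mem_items _ hpair hkeys d0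

-- B's loop: appending the current guess and mapping it forward, unrolled into iterates.
theorem pv_loop (f : Char → Char) (text : List Char) :
    ∀ (l : List Int) (acc : List String) (h : Char → Char),
    l.foldl (fun p (_ : Int) => (p.1 ++ [String.ofList p.2], p.2.map f)) (acc, text.map h)
    = (acc ++ (List.range l.length).map
        (fun k => String.ofList (text.map (fun ch => f^[k] (h ch)))),
       text.map (fun ch => f^[l.length] (h ch))) := by
  intro l
  induction l with
  | nil => intro acc h; simp
  | cons x t ih =>
    intro acc h
    rw [List.foldl_cons]
    have hmm : (text.map h).map f = text.map (fun ch => f (h ch)) := by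
      rw [List.map_map]; rfl
    rw [hmm, ih]
    simp only [List.length_cons, List.range_succ_eq_map, List.map_cons, List.map_map,
      Function.iterate_zero, id, List.append_assoc, List.singleton_append]
    simp only [Prod.mk.injEq]
    exact ⟨by congr 1, rfl⟩

theorem letter_frequency_attack_spec_aux (ciphertext : String) (top_n : Int) :
    letter_frequency_attack ciphertext top_n = letter_frequency_attack_alt ciphertext top_n := by
  unfold letter_frequency_attack letter_frequency_attack_alt
  dsimp only
  set text : List Char := (PySem.Chars.upper ciphertext.toList).filter PySem.Chars.isalpha with htext
  set letters := (PySem.List.sorted (PySem.Dict.counter text).items (fun item => item.2) true).map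
      (fun item => item.1) with hletters
  have hperm : letters.Perm (PySem.Set.ofList text) := by
    have h1 : letters.Perm ((PySem.Dict.counter text).items.map (fun item => item.1)) :=
      (PySem.List.sorted_perm _ _ _).map _
    have h2 : (PySem.Dict.counter text).items.map (fun item => item.1)
        = (PySem.Dict.counter text).keys := rfl
    rw [h2, PySem.Dict.keys_counter] at h1
    exact h1
  have hnd : letters.Nodup := hperm.nodup_iff.mpr (PySem.Set.nodup_ofList text)
  have hmemtext : ∀ c ∈ text, c ∈ letters := by
    intro c hc
    exact hperm.mem_iff.mpr ((PySem.Set.mem_ofList _ _).mpr hc)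
  have hupper : ∀ c ∈ letters, PySem.Chars.isupper c = true := by
    intro c hc
    have : c ∈ text := (PySem.Set.mem_ofList _ _).mp (hperm.mem_iff.mp hc)
    exact pv_text_upper ciphertext.toList c this
  have hlen : letters.length ≤ 26 := by
    have hsub : letters ⊆ ("ABCDEFGHIJKLMNOPQRSTUVWXYZ".toList) := by
      intro c hc; exact pv_mem_az c (hupper c hc)
    have := (List.subperm_of_subset hnd hsub).length_le
    simpa using this
  -- name B's succ dict
  have hsucc : ((PySem.List.pyRange 0 26 1).foldl
      (fun m j => m.insert (PySem.List.pyGetD pvFreqOrder j 'A')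
        (PySem.List.pyGetD pvFreqOrder (PySem.Int.mod (j + 1) 26) 'A'))
      (PySem.Dict.empty : PySem.Dict Char Char)) = pvSuccD := rfl
  simp only [hsucc]
  -- A's outer loop is a map; B's loop unrolls into iterates
  rw [PySem.List.foldl_append_singleton_eq_map, List.nil_append]
  rw [pv_loop]
  simp only [List.nil_append]
  rw [PySem.List.length_pyRange_one, PySem.List.pyRange_one]
  rw [List.map_map]
  apply List.map_congr_left
  intro kk _
  simp only [Function.comp_apply]
  -- drop the always-true j < 26 guard in A's inner loop
  have hguard : (PySem.List.enumerate letters 0).foldl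
      (fun m jc => if jc.1 < PySem.List.len pvFreqOrder then
        m.insert jc.2 (PySem.List.pyGetD pvFreqOrder
          (PySem.Int.mod (jc.1 + (0 + (kk : Int))) (PySem.List.len pvFreqOrder)) 'A') else m)
      PySem.Dict.empty
      = (PySem.List.enumerate letters 0).foldl
      (fun m jc => m.insert jc.2 (PySem.List.pyGetD pvFreqOrder
          (PySem.Int.mod (jc.1 + (0 + (kk : Int))) (PySem.List.len pvFreqOrder)) 'A'))
      PySem.Dict.empty := by
    apply PySem.List.foldl_congr_mem
    intro acc jc hjc
    rw [PySem.List.mem_enumerate_iff] at hjc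
    obtain ⟨k, hk, rfl⟩ := hjc
    have hklt : k < 26 := lt_of_lt_of_le hk hlen
    have h26 : PySem.List.len pvFreqOrder = 26 := by decide
    rw [h26, if_pos (show ((0 : Int) + (k : Int)) < 26 by omega)]
  rw [hguard]
  apply congrArg
  apply List.map_congr_left
  intro ch hch
  obtain ⟨k, hk, hco⟩ := List.mem_iff_getElem.mp (hmemtext ch hch)
  have hk26 : k < 26 := lt_of_lt_of_le hk hlen
  have hA := pv_getD_fold_insert letters hnd
    (fun j => PySem.List.pyGetD pvFreqOrder
      (PySem.Int.mod (j + (0 + (kk : Int))) (PySem.List.len pvFreqOrder)) 'A')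
    ch k hk hco ch
  beta_reduce at hA
  rw [hA, ← hco]
  have h26' : pvFreqOrder.length = 26 := by decide
  have hlen2 : letters.length ≤ (pvFreqOrder.take letters.length).length := by
    rw [List.length_take]; omega
  have hbase := pv_getD_zip letters (pvFreqOrder.take letters.length) hnd hlen2 k hk (letters[k])
  rw [hbase]
  have htake : (pvFreqOrder.take letters.length)[k]'(lt_of_lt_of_le hk hlen2)
      = pvE k := by rw [List.getElem_take, pv_pvE_getElem k hk26]; rfl
  rw [htake, pv_iter_succ kk k hk26]
  -- A's value is the same mod-26 English letter
  have h26 : PySem.List.len pvFreqOrder = 26 := by decide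
  rw [h26]
  have h1 : ((k : Int)) + (0 + (kk : Int)) = ((k + kk : Nat) : Int) := by
    push_cast; ring
  rw [h1]
  have h2 : PySem.Int.mod ((k + kk : Nat) : Int) 26 = (((k + kk) % 26 : Nat) : Int) := by
    exact_mod_cast PySem.Int.mod_natCast (k + kk) 26
  rw [h2]
  rfl

-- ===== VERDICT (by name: the statement is the Claim_ definition above) =====
theorem letter_frequency_attack_spec : Claim_equal_letter_frequency_attack := by
  intro ciphertext top_n _
  unfold Spec_letter_frequency_attack
  exact letter_frequency_attack_spec_aux ciphertext top_n
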